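-- pv_equiv track=rewrite | github.com/YangZimeng17/python-exercise | select_gifts.py | select_gifts
-- ===== SOURCE A (Python) =====
-- def select_gifts(good_ratings, want_ratings):
--     dict_total = {}
--     max_value = 0
--     list = []
--
--
--     for key,value in good_ratings.items():
--         cur_value = 0
--         if key not in want_ratings:
--             cur_value = value
--         else:
--             cur_value = value + want_ratings[key]
--         if cur_value > max_value:
--             max_value = cur_value
--             list = [key]
--         elif cur_value == max_value:
--             list.append(key)
--
--
--     for key,value in want_ratings.items():
--         if key not in dict_total:
--             if value > max_value:
--                 max_value = value
--                 list = [key]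
--             elif value == max_value:
--                 list.append(key)
--
--     for i in range(len(list)-1):
--         min = list[i]
--         index = i
--         for j in range(i,len(list)):
--             if list[j] < min:
--                 min = list[j]
--                 index = j
--         list[i], list[index] = list[index],list[i]
--
--     return list
-- ===== SOURCE B (Python) =====
-- def select_gifts(good_ratings, want_ratings):
--     cands = [(k, v + want_ratings.get(k, 0)) for k, v in good_ratings.items()]
--     cands += want_ratings.items()
--     m = 0
--     for _, s in cands:
--         m = max(m, s)
--     return sorted(k for k, s in cands if s == m)
-- ===== Notes on version B (the rewrite author's own statement) =====
-- stated objective: simpler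
-- what changed: Replaces the running-max loop with list resets and the hand-written index-based selection sort by: build one candidate (key,score) list, take the max of the scores together with the 0 floor, filter the keys hitting it, and sort with the library sorted().
import Mathlib
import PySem

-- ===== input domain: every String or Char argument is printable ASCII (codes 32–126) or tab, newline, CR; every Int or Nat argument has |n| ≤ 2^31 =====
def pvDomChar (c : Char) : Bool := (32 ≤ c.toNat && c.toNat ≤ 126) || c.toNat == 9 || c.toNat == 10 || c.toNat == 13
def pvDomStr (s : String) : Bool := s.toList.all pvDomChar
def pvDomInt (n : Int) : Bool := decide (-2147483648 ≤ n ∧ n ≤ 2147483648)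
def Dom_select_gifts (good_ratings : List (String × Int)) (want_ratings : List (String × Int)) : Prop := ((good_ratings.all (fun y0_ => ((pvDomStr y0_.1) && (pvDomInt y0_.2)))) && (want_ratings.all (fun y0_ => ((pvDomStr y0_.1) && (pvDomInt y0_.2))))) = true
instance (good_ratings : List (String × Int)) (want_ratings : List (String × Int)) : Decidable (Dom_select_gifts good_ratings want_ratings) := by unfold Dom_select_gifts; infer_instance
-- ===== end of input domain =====

-- B replaces A's running-max loop (with its list resets) and A's hand-written index-based
-- selection sort by: one candidate (key,score) list, max of the scores with the 0 floor,
-- filter the keys that hit it, library sort.  Objective: simpler.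

-- ===== PORT A =====
-- body of the inner j-loop of A's selection-sort pass (named so the proofs can speak about it)
def minStep (cur : List String) (mi : String × Int) (j : Int) : String × Int :=
  if PySem.List.pyGetD cur j "" < mi.1 then (PySem.List.pyGetD cur j "", j) else mi

-- A's inner j-loop: scan list[a:len] maintaining (min, index)
def innerFold (cur : List String) (a : Int) (acc : String × Int) : String × Int :=
  (PySem.List.pyRange a (cur.length : Int) 1).foldl (minStep cur) acc

-- body of A's outer selection-sort loop
def selStep (cur : List String) (i : Int) : List String :=
  let mi := innerFold cur i (PySem.List.pyGetD cur i "", i)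
  -- list[i], list[index] = list[index], list[i]
  PySem.List.pySetD (PySem.List.pySetD cur i (PySem.List.pyGetD cur mi.2 "")) mi.2
    (PySem.List.pyGetD cur i "")

def select_gifts (good_ratings : List (String × Int)) (want_ratings : List (String × Int)) : List String :=
  -- dict_total = {} ; max_value = 0 ; list = []
  let st1 := good_ratings.foldl (fun (st : Int × List String) (kv : String × Int) =>
      let cur_value : Int :=
        match want_ratings.lookup kv.1 with
        | none => kv.2
        | some w => kv.2 + w
      if cur_value > st.1 then (cur_value, [kv.1])
      else if cur_value = st.1 then (st.1, st.2 ++ [kv.1])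
      else st) (0, ([] : List String))
  let st2 := want_ratings.foldl (fun (st : Int × List String) (kv : String × Int) =>
      if ¬ (PySem.Dict.empty (κ := String) (ν := Int)).contains kv.1 then
        if kv.2 > st.1 then (kv.2, [kv.1])
        else if kv.2 = st.1 then (st.1, st.2 ++ [kv.1])
        else st
      else st) st1
  let lst := st2.2
  (PySem.List.pyRange 0 ((lst.length : Int) - 1) 1).foldl selStep lst

-- ===== PORT B =====
def select_gifts_alt (good_ratings : List (String × Int)) (want_ratings : List (String × Int)) : List String :=
  let cands : List (String × Int) :=
    good_ratings.map (fun kv => (kv.1, kv.2 + ((want_ratings.lookup kv.1).getD 0))) ++ want_ratings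
  let m : Int := cands.foldl (fun m p => max m p.2) 0
  PySem.List.sorted ((cands.filter (fun p => p.2 == m)).map Prod.fst) (fun x => x) false

-- ===== PRECONDITION & SPEC =====
def Spec_select_gifts (good_ratings : List (String × Int)) (want_ratings : List (String × Int)) (out : List String) : Prop := out = select_gifts_alt good_ratings want_ratings
instance (good_ratings : List (String × Int)) (want_ratings : List (String × Int)) (out : List String) : Decidable (Spec_select_gifts good_ratings want_ratings out) := by unfold Spec_select_gifts; infer_instance

-- ===== CLAIM (what is proved, stated in full; the proofs are below) =====
def Claim_equal_select_gifts : Prop := ∀ (good_ratings : List (String × Int)) (want_ratings : List (String × Int)), Dom_select_gifts good_ratings want_ratings → Spec_select_gifts good_ratings want_ratings (select_gifts good_ratings want_ratings)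

-- ===== LEMMAS AND PROOFS =====

-- the shared running-max step of A's two accumulation loops
def stepA (st : Int × List String) (p : String × Int) : Int × List String :=
  if p.2 > st.1 then (p.2, [p.1]) else if p.2 = st.1 then (st.1, st.2 ++ [p.1]) else st

def maxSc (m : Int) (cs : List (String × Int)) : Int := cs.foldl (fun a p => max a p.2) m

theorem maxSc_cons (m : Int) (c : String × Int) (cs : List (String × Int)) :
    maxSc m (c :: cs) = maxSc (max m c.2) cs := rfl

theorem le_maxSc (m : Int) (cs : List (String × Int)) : m ≤ maxSc m cs := by
  induction cs generalizing m with
  | nil => simp [maxSc]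
  | cons c cs ih => exact le_trans (le_max_left m c.2) (ih (max m c.2))

-- the running-max loop computes: the max of the scores, and the keys hitting it (in order)
theorem stepA_foldl (cs : List (String × Int)) : ∀ (m : Int) (l : List String),
    List.foldl stepA (m, l) cs
      = (maxSc m cs, (if maxSc m cs = m then l else [])
          ++ (cs.filter (fun p => p.2 == maxSc m cs)).map Prod.fst) := by
  induction cs with
  | nil => intro m l; simp [maxSc]
  | cons c cs ih =>
    intro m l
    rw [List.foldl_cons, maxSc_cons]
    rcases lt_trichotomy m c.2 with h | h | h
    · have hst : stepA (m, l) c = (c.2, [c.1]) := by simp [stepA, h, ne_of_gt h]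
      have hmax : max m c.2 = c.2 := max_eq_right h.le
      have hM : m < maxSc c.2 cs := lt_of_lt_of_le h (le_maxSc _ _)
      rw [hst, hmax, ih]
      have hMm : ¬ (maxSc c.2 cs = m) := by omega
      by_cases hc : c.2 = maxSc c.2 cs
      · simp [List.filter_cons, hc.symm, (show ¬ (c.2 = m) by omega)]
      · have hMc : ¬ (maxSc c.2 cs = c.2) := fun hh => hc hh.symm
        simp [List.filter_cons, hMm, hc, hMc]
    · have hst : stepA (m, l) c = (m, l ++ [c.1]) := by simp [stepA, ← h]
      have hmax : max m c.2 = m := by rw [← h, max_self]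
      rw [hst, hmax, ih]
      by_cases hMm : maxSc m cs = m
      · simp [List.filter_cons, ← h, hMm, List.append_assoc]
      · have hmM : ¬ (m = maxSc m cs) := fun hh => hMm hh.symm
        simp [List.filter_cons, ← h, hMm, hmM]
    · have hst : stepA (m, l) c = (m, l) := by simp [stepA, not_lt.mpr h.le, ne_of_lt h]
      have hmax : max m c.2 = m := max_eq_left h.le
      rw [hst, hmax, ih]
      have hcM : ¬ (c.2 = maxSc m cs) := by have := le_maxSc m cs; omega
      simp [List.filter_cons, hcM]

-- the minimum of a cons can be pulled to the front of its set-at-j copy, up to permutation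
theorem getElem_cons_set_perm {α : Type} (a : α) : ∀ (t : List α) (j : Nat) (hj : j < t.length),
    ((t[j]'hj) :: t.set j a).Perm (a :: t) := by
  intro t
  induction t with
  | nil => intro j hj; simp at hj
  | cons b t ih =>
    intro j hj
    cases j with
    | zero => simpa using List.Perm.swap a b t
    | succ j =>
      have hj' : j < t.length := by simpa using hj
      simp only [List.getElem_cons_succ, List.set_cons_succ]
      exact ((List.Perm.swap b _ _).trans (((ih j hj').cons b))).trans (List.Perm.swap a b t)

theorem innerFold_nil (cur : List String) (a : Int) (acc : String × Int)
    (h : (cur.length : Int) ≤ a) : innerFold cur a acc = acc := by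
  unfold innerFold; rw [PySem.List.pyRange_one_eq_nil h, List.foldl_nil]

theorem innerFold_cons (cur : List String) (a : Int) (acc : String × Int)
    (h : a < (cur.length : Int)) :
    innerFold cur a acc = innerFold cur (a + 1) (minStep cur acc a) := by
  unfold innerFold; rw [PySem.List.pyRange_one_cons h, List.foldl_cons]

-- A's inner j-loop: invariant of the (min, index) accumulator
theorem inner_inv (cur : List String) (lo : Int) : ∀ (k : Nat) (a : Int) (m : String) (idx : Int),
    ((cur.length : Int) - a).toNat = k → lo ≤ a →
    lo ≤ idx → idx < (cur.length : Int) →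
    PySem.List.pyGetD cur idx "" = m →
    lo ≤ (innerFold cur a (m, idx)).2 ∧ (innerFold cur a (m, idx)).2 < (cur.length : Int) ∧
      PySem.List.pyGetD cur (innerFold cur a (m, idx)).2 "" = (innerFold cur a (m, idx)).1 ∧
      (innerFold cur a (m, idx)).1 ≤ m ∧
      ∀ j : Int, a ≤ j → j < (cur.length : Int) →
        (innerFold cur a (m, idx)).1 ≤ PySem.List.pyGetD cur j "" := by
  intro k
  induction k with
  | zero =>
    intro a m idx hk ha hidx hlen hget
    rw [innerFold_nil cur a (m, idx) (by omega)]
    exact ⟨hidx, hlen, hget, le_refl m, fun j hj1 hj2 => False.elim (by omega)⟩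
  | succ k ih =>
    intro a m idx hk ha hidx hlen hget
    have hab : a < (cur.length : Int) := by omega
    rw [innerFold_cons cur a (m, idx) hab]
    by_cases hlt : PySem.List.pyGetD cur a "" < m
    · have hstep : minStep cur (m, idx) a = (PySem.List.pyGetD cur a "", a) := by
        simp [minStep, hlt]
      rw [hstep]
      obtain ⟨h1, h2, h3, h4, h5⟩ :=
        ih (a + 1) (PySem.List.pyGetD cur a "") a (by omega) (by omega) (by omega) hab rfl
      refine ⟨h1, h2, h3, le_trans h4 (le_of_lt hlt), ?_⟩
      intro j hj1 hj2
      rcases eq_or_lt_of_le hj1 with he | hlt2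
      · exact he ▸ h4
      · exact h5 j (by omega) hj2
    · have hstep : minStep cur (m, idx) a = (m, idx) := by simp [minStep, hlt]
      rw [hstep]
      obtain ⟨h1, h2, h3, h4, h5⟩ := ih (a + 1) m idx (by omega) (by omega) hidx hlen hget
      refine ⟨h1, h2, h3, h4, ?_⟩
      intro j hj1 hj2
      rcases eq_or_lt_of_le hj1 with he | hlt2
      · exact he ▸ (le_trans h4 (not_lt.mp hlt))
      · exact h5 j (by omega) hj2

-- one selection-sort pass: prefix kept, the minimum of the suffix moved to position i,
-- suffix permuted
theorem selStep_spec (cur : List String) (i : Int) (h0 : 0 ≤ i) (hi : i < (cur.length : Int)) :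
    (selStep cur i).length = cur.length ∧
    (selStep cur i).Perm cur ∧
    ((selStep cur i).drop i.toNat).Perm (cur.drop i.toNat) ∧
    ∃ mn, (selStep cur i).take (i.toNat + 1) = cur.take i.toNat ++ [mn] ∧
      mn ∈ cur.drop i.toNat ∧ (∀ y ∈ cur.drop i.toNat, mn ≤ y) := by
  obtain ⟨h1, h2, h3, h4, h5⟩ :=
    inner_inv cur i ((cur.length : Int) - i).toNat i (PySem.List.pyGetD cur i "") i rfl
      (le_refl i) (le_refl i) hi rfl
  set p := innerFold cur i (PySem.List.pyGetD cur i "", i) with hp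
  set iN := i.toNat with hiN
  set ixN := p.2.toNat with hixN
  have hiNlt : iN < cur.length := by omega
  have hixNlt : ixN < cur.length := by omega
  have hiix : iN ≤ ixN := by omega
  have hgetix : PySem.List.pyGetD cur p.2 "" = cur[ixN]'hixNlt :=
    PySem.List.pyGetD_eq_getElem cur "" (by omega) h2
  have hgeti : PySem.List.pyGetD cur i "" = cur[iN]'hiNlt :=
    PySem.List.pyGetD_eq_getElem cur "" h0 hi
  have hsw : selStep cur i = (cur.set iN (cur[ixN]'hixNlt)).set ixN (cur[iN]'hiNlt) := by
    show PySem.List.pySetD (PySem.List.pySetD cur i (PySem.List.pyGetD cur p.2 "")) p.2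
        (PySem.List.pyGetD cur i "") = _
    rw [hgetix, hgeti, PySem.List.pySetD_of_nonneg _ _ h0,
      PySem.List.pySetD_of_nonneg _ _ (show (0:Int) ≤ p.2 by omega)]
  set sw := (cur.set iN (cur[ixN]'hixNlt)).set ixN (cur[iN]'hiNlt) with hswdef
  have hlen : sw.length = cur.length := by simp [hswdef]
  have hswIN : sw[iN]'(by omega) = cur[ixN]'hixNlt := by
    by_cases he : ixN = iN
    · simp [hswdef, List.getElem_set, he]
    · simp [hswdef, List.getElem_set, he]
  have htakeeq : sw.take iN = cur.take iN := by
    apply List.ext_getElem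
    · simp [hlen]
    · intro k hk1 hk2
      have hkiN : k < iN := by simp at hk1; omega
      simp [hswdef, List.getElem_take, List.getElem_set,
        (show ¬ (ixN = k) by omega), (show ¬ (iN = k) by omega)]
  have hdperm : (sw.drop iN).Perm (cur.drop iN) := by
    rcases Nat.eq_or_lt_of_le hiix with he | hlt
    · have hsweq : sw = cur := by
        apply List.ext_getElem (by simp [hlen])
        intro k hh1 hh2
        by_cases hk : ixN = k
        · simp [hswdef, List.getElem_set, hk, ← he, show iN = k by omega]
        · simp [hswdef, List.getElem_set, hk, show ¬ (iN = k) by omega]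
      rw [hsweq]
    · have hd : sw.drop iN
          = (cur[ixN]'hixNlt) :: ((cur.drop (iN + 1)).set (ixN - iN - 1) (cur[iN]'hiNlt)) := by
        apply List.ext_getElem
        · simp [hlen]; omega
        · intro k hk1 hk2
          have hkb : k < cur.length - iN := by simp [hlen] at hk1; omega
          cases k with
          | zero =>
            simp only [List.getElem_drop, List.getElem_cons_zero]
            simp [hswdef, List.getElem_set, show ¬ (ixN = iN) by omega]
          | succ k =>
            simp only [List.getElem_drop, List.getElem_cons_succ]
            by_cases hk : ixN = iN + (k + 1)
            · simp [hswdef, List.getElem_set, hk, show ixN - iN - 1 = k by omega]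
            · simp [hswdef, List.getElem_set, hk, show ¬ (iN = iN + (k + 1)) by omega,
                show ¬ (ixN - iN - 1 = k) by omega, List.getElem_drop,
                show iN + 1 + k = iN + (k + 1) by omega]
      have hdc : cur.drop iN = (cur[iN]'hiNlt) :: cur.drop (iN + 1) :=
        List.drop_eq_getElem_cons hiNlt
      have hix' : ixN - iN - 1 < (cur.drop (iN + 1)).length := by simp; omega
      have hixval : ((cur.drop (iN + 1))[ixN - iN - 1]'hix') = cur[ixN]'hixNlt := by
        simp only [List.getElem_drop]
        simp [show iN + 1 + (ixN - iN - 1) = ixN by omega]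
      rw [hd, hdc, ← hixval]
      exact getElem_cons_set_perm (cur[iN]'hiNlt) (cur.drop (iN + 1)) (ixN - iN - 1) hix'
  have hperm : sw.Perm cur := by
    have h1 : sw = cur.take iN ++ sw.drop iN := by
      rw [← htakeeq]; exact (List.take_append_drop iN sw).symm
    have h4 : (cur.take iN ++ cur.drop iN).Perm cur := by rw [List.take_append_drop]
    rw [h1]
    exact (hdperm.append_left (cur.take iN)).trans h4
  have hmem : (cur[ixN]'hixNlt) ∈ cur.drop iN := by
    have hix2 : ixN - iN < (cur.drop iN).length := by simp; omega
    have : ((cur.drop iN)[ixN - iN]'hix2) = cur[ixN]'hixNlt := by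
      simp only [List.getElem_drop]
      simp [show iN + (ixN - iN) = ixN by omega]
    rw [← this]; exact List.getElem_mem hix2
  have hmin : ∀ y ∈ cur.drop iN, (cur[ixN]'hixNlt) ≤ y := by
    intro y hy
    obtain ⟨k, hk, hky⟩ := List.mem_iff_getElem.mp hy
    have hklen : iN + k < cur.length := by simp at hk; omega
    have hyv : y = cur[iN + k]'hklen := by rw [← hky]; simp only [List.getElem_drop]
    have hj := h5 ((iN + k : Nat) : Int) (by omega) (by omega)
    rw [PySem.List.pyGetD_eq_getElem (i := ((iN + k : Nat) : Int)) cur "" (by omega)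
      (by omega)] at hj
    simp only [Int.toNat_natCast] at hj
    rw [hgetix] at h3
    rw [hyv]
    rw [← h3] at hj
    exact hj
  have htake1 : sw.take (iN + 1) = cur.take iN ++ [cur[ixN]'hixNlt] := by
    rw [List.take_succ, htakeeq]
    congr 1
    rw [List.getElem?_eq_getElem (by omega)]
    simp [hswIN]
  rw [hsw]
  exact ⟨hlen, hperm, hdperm, cur[ixN]'hixNlt, htake1, hmem, hmin⟩

-- A's outer selection-sort loop sorts the list (invariant: the prefix before i is the
-- sorted least elements)
theorem outer_inv : ∀ (k : Nat) (i : Int) (cur : List String),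
    ((cur.length : Int) - 1 - i).toNat = k → 0 ≤ i →
    (cur.take i.toNat).Pairwise (· ≤ ·) →
    (∀ x ∈ cur.take i.toNat, ∀ y ∈ cur.drop i.toNat, x ≤ y) →
    ((PySem.List.pyRange i ((cur.length : Int) - 1) 1).foldl selStep cur).Perm cur ∧
      ((PySem.List.pyRange i ((cur.length : Int) - 1) 1).foldl selStep cur).Pairwise (· ≤ ·) := by
  intro k
  induction k with
  | zero =>
    intro i cur hk h0 hpw hcross
    rw [PySem.List.pyRange_one_eq_nil (by omega), List.foldl_nil]
    refine ⟨List.Perm.refl _, ?_⟩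
    have hdp : (cur.drop i.toNat).Pairwise (· ≤ ·) := by
      have hlen1 : (cur.drop i.toNat).length ≤ 1 := by simp; omega
      cases hd : cur.drop i.toNat with
      | nil => simp
      | cons x xs =>
        cases xs with
        | nil => simp
        | cons y ys => rw [hd] at hlen1; simp at hlen1
    have hall := List.pairwise_append.mpr ⟨hpw, hdp, hcross⟩
    rwa [List.take_append_drop] at hall
  | succ k ih =>
    intro i cur hk h0 hpw hcross
    have hi : i < (cur.length : Int) - 1 := by omega
    rw [PySem.List.pyRange_one_cons hi, List.foldl_cons]
    obtain ⟨hlen, hperm, hdperm, mn, htake, hmem, hmin⟩ := selStep_spec cur i h0 (by omega)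
    have hlenr : ((cur.length : Int) - 1) = ((selStep cur i).length : Int) - 1 := by rw [hlen]
    rw [hlenr]
    have hiN : (i + 1).toNat = i.toNat + 1 := by omega
    have hpw' : ((selStep cur i).take (i + 1).toNat).Pairwise (· ≤ ·) := by
      rw [hiN, htake]
      apply List.pairwise_append.mpr
      refine ⟨hpw, by simp, ?_⟩
      intro x hx b hb
      simp at hb
      rw [hb]
      exact hcross x hx mn hmem
    have hcross' : ∀ x ∈ (selStep cur i).take (i + 1).toNat,
        ∀ y ∈ (selStep cur i).drop (i + 1).toNat, x ≤ y := by
      intro x hx y hy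
      have hy1 : y ∈ (selStep cur i).drop i.toNat := by
        have hdd : (selStep cur i).drop (i + 1).toNat = ((selStep cur i).drop i.toNat).drop 1 := by
          rw [List.drop_drop, show i.toNat + 1 = (i + 1).toNat by omega]
        rw [hdd] at hy
        exact List.mem_of_mem_drop hy
      have hy2 : y ∈ cur.drop i.toNat := (hdperm.mem_iff).mp hy1
      rw [hiN, htake] at hx
      rcases List.mem_append.mp hx with hx1 | hx1
      · exact hcross x hx1 y hy2
      · simp at hx1; subst hx1
        exact hmin y hy2
    obtain ⟨p1, p2⟩ := ih (i + 1) (selStep cur i) (by omega) (by omega) hpw' hcross'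
    exact ⟨p1.trans hperm, p2⟩

-- A's hand-written selection sort is Python's sorted()
theorem selsort_eq (lst : List String) :
    (PySem.List.pyRange 0 ((lst.length : Int) - 1) 1).foldl selStep lst
      = PySem.List.sorted lst (fun x => x) false := by
  obtain ⟨hp, hs⟩ := outer_inv ((lst.length : Int) - 1 - 0).toNat 0 lst rfl (le_refl 0)
    (by simp) (by simp)
  exact (PySem.List.sorted_id_eq_of_perm_of_pairwise _ _ hp hs).symm

-- A's first loop is the running-max fold over the scored good_ratings items
theorem loop1_eq (want_ratings : List (String × Int)) :
    ∀ (good : List (String × Int)) (st : Int × List String),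
    good.foldl (fun (st : Int × List String) (kv : String × Int) =>
        let cur_value : Int :=
          match want_ratings.lookup kv.1 with
          | none => kv.2
          | some w => kv.2 + w
        if cur_value > st.1 then (cur_value, [kv.1])
        else if cur_value = st.1 then (st.1, st.2 ++ [kv.1])
        else st) st
      = List.foldl stepA st
          (good.map (fun kv => (kv.1, kv.2 + ((want_ratings.lookup kv.1).getD 0)))) := by
  intro good
  induction good with
  | nil => intro st; rfl
  | cons c g ihg =>
    intro st
    simp only [List.foldl_cons, List.map_cons]
    rw [ihg]
    congr 1
    cases hw : want_ratings.lookup c.1 <;> simp [stepA]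

-- A's second loop: the dict_total guard is vacuous (dict_total stays empty)
theorem loop2_eq : ∀ (want : List (String × Int)) (st : Int × List String),
    want.foldl (fun (st : Int × List String) (kv : String × Int) =>
        if ¬ (PySem.Dict.empty (κ := String) (ν := Int)).contains kv.1 then
          if kv.2 > st.1 then (kv.2, [kv.1])
          else if kv.2 = st.1 then (st.1, st.2 ++ [kv.1])
          else st
        else st) st
      = List.foldl stepA st want := by
  intro want
  induction want with
  | nil => intro st; rfl
  | cons c w ihw =>
    intro st
    simp only [List.foldl_cons]
    rw [ihw]
    congr 1

-- ===== VERDICT (by name: the statement is the Claim_ definition above) =====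
theorem select_gifts_spec : Claim_equal_select_gifts := by
  intro good want _
  show select_gifts good want = select_gifts_alt good want
  simp only [select_gifts, select_gifts_alt]
  rw [loop1_eq, loop2_eq, ← List.foldl_append, stepA_foldl]
  simp only [ite_self, List.nil_append]
  rw [selsort_eq]
  rfl
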